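-- pv_equiv track=rewrite | github.com/masashi-y/depccg | depccg/super/py_utils.py | find_non_nested_char
-- ===== SOURCE A (Python) =====
-- def find_non_nested_char(haystack, needles):
--     open_brackets = 0
--     # for i, c in enumerate(haystack):
--     for i in range(len(haystack) -1, -1, -1):
--         c = haystack[i]
--         if c == '(':
--             open_brackets += 1
--         elif c == ')':
--             open_brackets -= 1
--         elif open_brackets == 0:
--             for n in needles:
--                 if n == c: return i
--     return -1
-- ===== SOURCE B (Python) =====
-- def find_non_nested_char(haystack, needles):
--     total = haystack.count('(') - haystack.count(')')
--     bal = 0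
--     best = -1
--     for i, c in enumerate(haystack):
--         if c == '(':
--             bal += 1
--         elif c == ')':
--             bal -= 1
--         elif bal == total and c in needles:
--             best = i
--     return best
-- ===== Notes on version B (the rewrite author's own statement) =====
-- stated objective: alternative
-- what changed: Replaces A's right-to-left scan with suffix bracket balance and early return by a single left-to-right pass that precomputes the total balance T, tracks the running prefix balance, and keeps the last index of a non-bracket needle char seen with bal == T.
import Mathlib
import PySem

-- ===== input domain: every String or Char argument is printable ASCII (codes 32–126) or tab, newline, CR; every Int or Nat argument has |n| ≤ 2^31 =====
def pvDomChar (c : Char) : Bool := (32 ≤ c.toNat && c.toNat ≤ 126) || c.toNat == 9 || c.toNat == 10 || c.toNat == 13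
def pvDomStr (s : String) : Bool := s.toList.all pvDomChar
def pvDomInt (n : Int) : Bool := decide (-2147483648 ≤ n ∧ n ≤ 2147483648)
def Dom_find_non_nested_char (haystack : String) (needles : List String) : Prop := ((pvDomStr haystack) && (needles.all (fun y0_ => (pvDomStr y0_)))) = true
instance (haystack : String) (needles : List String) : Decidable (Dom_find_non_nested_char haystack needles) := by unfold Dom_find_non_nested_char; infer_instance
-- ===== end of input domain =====

-- B changes the decomposition: one left-to-right pass comparing the running prefix balance
-- with the precomputed total balance, keeping the last match, instead of A's right-to-left
-- scan with a suffix balance and early return (objective: alternative, same cost).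

-- ===== PORT A =====
-- the inner 'for n in needles: if n == c: return i' loop
def pvHasNeedle : List String → Char → Bool
  | [], _ => false
  | n :: rest, c => if n = String.ofList [c] then true else pvHasNeedle rest c

-- A's loop: iterates i from len-1 down to 0; we recurse over the reversed char list,
-- carrying the current index i (counting down) and open_brackets ob.
def pvAuxA : List Char → List String → Int → Int → Int
  | [], _, _, _ => -1
  | c :: rest, needles, i, ob =>
    if c = '(' then pvAuxA rest needles (i - 1) (ob + 1)
    else if c = ')' then pvAuxA rest needles (i - 1) (ob - 1)
    else if ob = 0 ∧ pvHasNeedle needles c then i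
    else pvAuxA rest needles (i - 1) ob

def find_non_nested_char (haystack : String) (needles : List String) : Int :=
  pvAuxA haystack.toList.reverse needles ((haystack.toList.length : Int) - 1) 0

-- ===== PORT B =====
-- B's loop: left-to-right, running balance bal, total balance T, last match kept in best.
def pvAuxB : List Char → List String → Int → Int → Int → Int → Int
  | [], _, _, _, _, best => best
  | c :: rest, needles, i, bal, T, best =>
    if c = '(' then pvAuxB rest needles (i + 1) (bal + 1) T best
    else if c = ')' then pvAuxB rest needles (i + 1) (bal - 1) T best
    else if bal = T ∧ needles.contains (String.ofList [c]) then pvAuxB rest needles (i + 1) bal T i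
    else pvAuxB rest needles (i + 1) bal T best

def find_non_nested_char_alt (haystack : String) (needles : List String) : Int :=
  let cs := haystack.toList
  pvAuxB cs needles 0 0 ((cs.count '(' : Int) - (cs.count ')' : Int)) (-1)

-- ===== PRECONDITION & SPEC =====
def Spec_find_non_nested_char (haystack : String) (needles : List String) (out : Int) : Prop := out = find_non_nested_char_alt haystack needles
instance (haystack : String) (needles : List String) (out : Int) : Decidable (Spec_find_non_nested_char haystack needles out) := by unfold Spec_find_non_nested_char; infer_instance

-- ===== CLAIM (what is proved, stated in full; the proofs are below) =====
def Claim_equal_find_non_nested_char : Prop := ∀ (haystack : String) (needles : List String), Dom_find_non_nested_char haystack needles → Spec_find_non_nested_char haystack needles (find_non_nested_char haystack needles)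

-- ===== LEMMAS AND PROOFS =====

-- bracket balance of a char list
def pvBal : List Char → Int
  | [] => 0
  | c :: rest => (if c = '(' then 1 else if c = ')' then -1 else 0) + pvBal rest

lemma pvBal_append (l m : List Char) : pvBal (l ++ m) = pvBal l + pvBal m := by
  induction l with
  | nil => simp [pvBal]
  | cons c rest ih => simp [pvBal, ih]; ring

lemma pvBal_reverse (l : List Char) : pvBal l.reverse = pvBal l := by
  induction l with
  | nil => rfl
  | cons c rest ih => simp [pvBal, List.reverse_cons, pvBal_append, ih]; ring

lemma pvBal_eq_counts (l : List Char) : pvBal l = (l.count '(' : Int) - (l.count ')' : Int) := by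
  induction l with
  | nil => simp [pvBal]
  | cons c rest ih =>
    by_cases h1 : c = '(' <;> by_cases h2 : c = ')'
    · subst h1; simp at h2
    · subst h1; simp [pvBal, ih]; omega
    · subst h2; simp [pvBal, ih]; omega
    · simp [pvBal, h1, h2, ih]

lemma pvHasNeedle_eq_contains (ns : List String) (c : Char) :
    pvHasNeedle ns c = ns.contains (String.ofList [c]) := by
  induction ns with
  | nil => rfl
  | cons n rest ih =>
    by_cases h : n = String.ofList [c] <;> simp [pvHasNeedle, h, ih, eq_comm]

-- results of pvAuxA are -1 or actual indices in [i - len + 1, i]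
lemma pvAuxA_range (l : List Char) (n : List String) (i ob : Int) :
    pvAuxA l n i ob = -1 ∨ (i - l.length + 1 ≤ pvAuxA l n i ob ∧ pvAuxA l n i ob ≤ i) := by
  induction l generalizing i ob with
  | nil => left; rfl
  | cons c rest ih =>
    simp only [pvAuxA]
    split_ifs with h1 h2 h3
    · rcases ih (i - 1) (ob + 1) with h | h
      · left; exact h
      · right; simp only [List.length_cons] at *; push_cast at *; omega
    · rcases ih (i - 1) (ob - 1) with h | h
      · left; exact h
      · right; simp only [List.length_cons] at *; push_cast at *; omega
    · right; simp only [List.length_cons]; push_cast; omega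
    · rcases ih (i - 1) ob with h | h
      · left; exact h
      · right; simp only [List.length_cons] at *; push_cast at *; omega

-- A's loop over a concatenation: process l; if it did not return, continue into m
lemma pvAuxA_append (l m : List Char) (n : List String) (i ob : Int)
    (hl : (l.length : Int) ≤ i + 1) :
    pvAuxA (l ++ m) n i ob =
      if pvAuxA l n i ob = -1 then pvAuxA m n (i - l.length) (ob + pvBal l)
      else pvAuxA l n i ob := by
  induction l generalizing i ob with
  | nil => simp [pvAuxA, pvBal]
  | cons c rest ih =>
    have hr : (rest.length : Int) ≤ (i - 1) + 1 := by
      simp only [List.length_cons] at hl; push_cast at hl ⊢; omega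
    have e1 : i - 1 - (rest.length : Int) = i - (((c :: rest).length : Nat) : Int) := by
      simp only [List.length_cons]; push_cast; ring
    by_cases h1 : c = '('
    · simp only [List.cons_append, pvAuxA, if_pos h1, pvBal]
      rw [ih (i - 1) (ob + 1) hr, e1,
        show ob + 1 + pvBal rest = ob + (1 + pvBal rest) from by ring]
    · by_cases h2 : c = ')'
      · simp only [List.cons_append, pvAuxA, if_neg h1, if_pos h2, pvBal]
        rw [ih (i - 1) (ob - 1) hr, e1,
          show ob - 1 + pvBal rest = ob + (-1 + pvBal rest) from by ring]
      · by_cases h3 : ob = 0 ∧ pvHasNeedle n c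
        · simp only [List.cons_append, pvAuxA, if_neg h1, if_neg h2, if_pos h3]
          have : ¬ (i = -1) := by
            simp only [List.length_cons] at hl; push_cast at hl; omega
          simp [this]
        · simp only [List.cons_append, pvAuxA, if_neg h1, if_neg h2, if_neg h3, pvBal]
          rw [ih (i - 1) ob hr, e1,
            show ob + pvBal rest = ob + (0 + pvBal rest) from by ring]

-- the main invariant relating B's forward scan to A's backward scan
lemma pvAux_main (cs : List Char) (n : List String) (i bal T best : Int) (hi : 0 ≤ i) :
    pvAuxB cs n i bal T best =
      if pvAuxA cs.reverse n (i + cs.length - 1) (T - bal - pvBal cs) = -1 then best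
      else pvAuxA cs.reverse n (i + cs.length - 1) (T - bal - pvBal cs) := by
  induction cs generalizing i bal best with
  | nil => simp [pvAuxA, pvAuxB]
  | cons c rest ih =>
    have hlen : ((rest.reverse.length : Nat) : Int) ≤ (i + ((c :: rest).length : Nat) - 1) + 1 := by
      simp only [List.length_reverse, List.length_cons]; push_cast; omega
    have happ := pvAuxA_append rest.reverse [c] n (i + ((c :: rest).length : Nat) - 1)
        (T - bal - pvBal (c :: rest)) hlen
    have hidx : (i + (((c :: rest).length : Nat) : Int) - 1) = (i + 1) + ((rest.length : Nat) : Int) - 1 := by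
      simp only [List.length_cons]; push_cast; ring
    have hrange := pvAuxA_range rest.reverse n ((i + 1) + ((rest.length : Nat) : Int) - 1)
    simp only [List.reverse_cons, pvAuxB]
    rw [happ]
    simp only [pvBal_reverse, List.length_reverse, hidx]
    by_cases h1 : c = '('
    · subst h1
      have hbal : T - bal - pvBal ('(' :: rest) = T - (bal + 1) - pvBal rest := by
        simp [pvBal]; ring
      rw [hbal, ih (i + 1) (bal + 1) best (by omega)]
      rcases hrange (T - (bal + 1) - pvBal rest) with h | h
      · simp only [h, if_pos rfl]
        simp [pvAuxA]
      · have hne : pvAuxA rest.reverse n (i + 1 + ((rest.length : Nat) : Int) - 1)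
            (T - (bal + 1) - pvBal rest) ≠ -1 := by
          simp only [List.length_reverse] at h; omega
        simp [hne]
    · by_cases h2 : c = ')'
      · subst h2
        have hbal : T - bal - pvBal (')' :: rest) = T - (bal - 1) - pvBal rest := by
          simp [pvBal]; ring
        rw [if_neg (by decide), hbal, ih (i + 1) (bal - 1) best (by omega)]
        rcases hrange (T - (bal - 1) - pvBal rest) with h | h
        · simp only [h]
          simp [pvAuxA]
        · have hne : pvAuxA rest.reverse n (i + 1 + ((rest.length : Nat) : Int) - 1)
              (T - (bal - 1) - pvBal rest) ≠ -1 := by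
            simp only [List.length_reverse] at h; omega
          simp [hne]
      · -- non-bracket char
        have hbal : T - bal - pvBal (c :: rest) = T - bal - pvBal rest := by
          simp [pvBal, h1, h2]
        rw [if_neg h1, if_neg h2, hbal]
        have hA1 : pvAuxA [c] n (i + 1 + ((rest.length : Nat) : Int) - 1 - rest.length)
            (T - bal - pvBal rest + pvBal rest) =
            if T - bal = 0 ∧ pvHasNeedle n c then i + 1 + ((rest.length : Nat) : Int) - 1 - rest.length
            else -1 := by
          simp only [pvAuxA, if_neg h1, if_neg h2,
            show T - bal - pvBal rest + pvBal rest = T - bal from by ring]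
        have eidx : i + 1 + ((rest.length : Nat) : Int) - 1 - (rest.length : Int) = i := by ring
        rcases hrange (T - bal - pvBal rest) with h | h
        · -- the part right of c matched nothing
          rw [h, if_pos rfl, hA1, eidx]
          by_cases hc : bal = T ∧ n.contains (String.ofList [c])
          · have hc' : T - bal = 0 ∧ pvHasNeedle n c = true := by
              rw [pvHasNeedle_eq_contains]; exact ⟨by omega, hc.2⟩
            rw [if_pos hc, if_pos hc', ih (i + 1) bal i (by omega), h, if_pos rfl]
            have : ¬ (i = -1) := by omega
            simp [this]
          · have hc' : ¬ (T - bal = 0 ∧ pvHasNeedle n c = true) := by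
              rw [pvHasNeedle_eq_contains]
              intro hv; exact hc ⟨by omega, hv.2⟩
            rw [if_neg hc, ih (i + 1) bal best (by omega), h, if_pos rfl, if_neg hc']
            simp
        · -- the part right of c returned an index ≥ 0
          have hne : pvAuxA rest.reverse n (i + 1 + ((rest.length : Nat) : Int) - 1)
              (T - bal - pvBal rest) ≠ -1 := by
            simp only [List.length_reverse] at h; omega
          rw [if_neg hne]
          by_cases hc : bal = T ∧ n.contains (String.ofList [c])
          · rw [if_pos hc, ih (i + 1) bal i (by omega), if_neg hne]
            try simp [hne]
          · rw [if_neg hc, ih (i + 1) bal best (by omega), if_neg hne]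
            try simp

-- ===== VERDICT (by name: the statement is the Claim_ definition above) =====
theorem find_non_nested_char_spec : Claim_equal_find_non_nested_char := by
  intro haystack needles _
  unfold Spec_find_non_nested_char find_non_nested_char find_non_nested_char_alt
  rw [pvAux_main haystack.toList needles 0 0 _ (-1) le_rfl, ← pvBal_eq_counts]
  simp only [zero_add, sub_zero, sub_self]
  rcases pvAuxA_range haystack.toList.reverse needles ((haystack.toList.length : Int) - 1) 0 with h | h
  · rw [h]; simp
  · have hne : pvAuxA haystack.toList.reverse needles ((haystack.toList.length : Int) - 1) 0 ≠ -1 := by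
      simp only [List.length_reverse] at h; omega
    simp [hne]
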